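-- pv_equiv track=rewrite | github.com/yosuanicolaus/practice-python | codechef/distinct_dilemma.py | solve
-- ===== SOURCE A (Python) =====
-- def solve(A):
--     total = 0
--     for num in A:
--         total += num
--
--     count = 0
--     i = 1
--     while total >= i:
--         total -= i
--         i += 1
--         count += 1
--
--     return count
-- ===== SOURCE B (Python) =====
-- import math
--
-- def solve(A):
--     total = sum(A)
--     if total < 1:
--         return 0
--     return (math.isqrt(8 * total + 1) - 1) // 2
-- ===== Notes on version B (the rewrite author's own statement) =====
-- stated objective: faster
-- what changed: Replaces the step-by-step triangular subtraction loop with a closed-form largest k such that k(k+1)/2 <= sum(A), computed via math.isqrt.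
import Mathlib
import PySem

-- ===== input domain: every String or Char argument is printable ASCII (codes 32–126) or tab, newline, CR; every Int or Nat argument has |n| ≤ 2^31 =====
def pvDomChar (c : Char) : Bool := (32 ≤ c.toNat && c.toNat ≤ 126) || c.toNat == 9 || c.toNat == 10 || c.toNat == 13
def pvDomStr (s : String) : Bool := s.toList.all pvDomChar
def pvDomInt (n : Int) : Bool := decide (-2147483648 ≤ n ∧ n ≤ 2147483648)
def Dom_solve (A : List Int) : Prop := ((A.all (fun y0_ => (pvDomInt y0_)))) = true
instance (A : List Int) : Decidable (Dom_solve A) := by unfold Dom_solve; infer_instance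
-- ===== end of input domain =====

-- B replaces A's step-by-step triangular subtraction loop with a closed form via isqrt (faster).

-- ===== PORT A =====
-- the while loop: while total >= i: total -= i; i += 1; count += 1
-- (h : 1 ≤ i is the loop invariant needed for termination; the entry call uses i = 1)
def solveLoop (total i count : Int) (h : 1 ≤ i) : Int :=
  if _hc : total ≥ i then
    solveLoop (total - i) (i + 1) (count + 1) (by omega)
  else
    count
termination_by (total + 1 - i).toNat
decreasing_by omega

def solve (A : List Int) : Int :=
  let total := A.foldl (fun acc num => acc + num) 0
  solveLoop total 1 0 (le_refl 1)

-- ===== PORT B =====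
def solve_alt (A : List Int) : Int :=
  let total := A.foldl (· + ·) 0
  if total < 1 then 0
  else PySem.Int.floordiv ((Nat.sqrt (8 * total + 1).toNat : Int) - 1) 2

-- ===== PRECONDITION & SPEC =====
def Spec_solve (A : List Int) (out : Int) : Prop := out = solve_alt A
instance (A : List Int) (out : Int) : Decidable (Spec_solve A out) := by unfold Spec_solve; infer_instance

-- ===== CLAIM (what is proved, stated in full; the proofs are below) =====
def Claim_equal_solve : Prop := ∀ (A : List Int), Dom_solve A → Spec_solve A (solve A)

-- ===== LEMMAS AND PROOFS =====

-- count is a pure accumulator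
lemma solveLoop_count (total i count : Int) (h : 1 ≤ i) :
    solveLoop total i count h = count + solveLoop total i 0 h := by
  conv_lhs => rw [solveLoop]
  conv_rhs => rw [solveLoop]
  by_cases hc : total ≥ i
  · simp only [hc, dif_pos]
    rw [solveLoop_count (total - i) (i + 1) (count + 1) (by omega),
        solveLoop_count (total - i) (i + 1) (0 + 1) (by omega)]
    ring
  · simp [hc]
termination_by (total + 1 - i).toNat
decreasing_by all_goals omega

-- characterization of the loop: it returns the number of steps k
lemma solveLoop_char (k : Nat) : ∀ (total i : Int) (h : 1 ≤ i),
    (k : Int) * (2 * i + k - 1) ≤ 2 * total →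
    2 * total < ((k : Int) + 1) * (2 * i + k) →
    solveLoop total i 0 h = k := by
  induction k with
  | zero =>
      intro total i h _ hub
      rw [solveLoop]
      have : ¬ total ≥ i := by push_cast at hub; nlinarith
      simp [this]
  | succ k ih =>
      intro total i h hlb hub
      have hge : total ≥ i := by push_cast at hlb ⊢; nlinarith [Int.natCast_nonneg k]
      rw [solveLoop]
      simp only [hge, dif_pos]
      rw [solveLoop_count]
      have := ih (total - i) (i + 1) (by omega)
        (by push_cast at hlb ⊢; nlinarith)
        (by push_cast at hub ⊢; nlinarith)
      rw [this]
      push_cast; ring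

-- the closed form yields the same k
lemma alt_char (total : Int) (ht : 1 ≤ total) :
    ∃ k : Nat, ((k : Int) * (2 * 1 + k - 1) ≤ 2 * total ∧
      2 * total < ((k : Int) + 1) * (2 * 1 + k)) ∧
      PySem.Int.floordiv ((Nat.sqrt (8 * total + 1).toNat : Int) - 1) 2 = k := by
  set m : Nat := (8 * total + 1).toNat with hm
  have hmval : (m : Int) = 8 * total + 1 := by omega
  set r : Nat := Nat.sqrt m with hr
  have hr3 : 3 ≤ r := by
    have h9 : 3 * 3 ≤ m := by omega
    exact Nat.le_sqrt'.mpr h9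
  refine ⟨(r - 1) / 2, ⟨?_, ?_⟩, ?_⟩
  · -- lower bound: (2k+1)^2 ≤ r^2 ≤ m
    have hsq : r * r ≤ m := by rw [← pow_two]; exact Nat.sqrt_le' m
    have h2k : 2 * ((r - 1) / 2) + 1 ≤ r := by omega
    have : (2 * ((r - 1) / 2) + 1) * (2 * ((r - 1) / 2) + 1) ≤ m :=
      le_trans (Nat.mul_le_mul h2k h2k) hsq
    set k := (r - 1) / 2
    have hcast : ((2 * k + 1) * (2 * k + 1) : Int) ≤ (m : Int) := by exact_mod_cast this
    push_cast at hcast ⊢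
    nlinarith [hmval]
  · -- upper bound: m < (r+1)^2 ≤ (2k+3)^2
    have hsq : m < (r + 1) * (r + 1) := by rw [← pow_two]; exact Nat.lt_succ_sqrt' m
    have h2k : r + 1 ≤ 2 * ((r - 1) / 2) + 3 := by omega
    have : m < (2 * ((r - 1) / 2) + 3) * (2 * ((r - 1) / 2) + 3) :=
      lt_of_lt_of_le hsq (Nat.mul_le_mul h2k h2k)
    set k := (r - 1) / 2
    have hcast : (m : Int) < ((2 * k + 3) * (2 * k + 3) : Int) := by exact_mod_cast this
    push_cast at hcast ⊢
    -- m = 8*total+1 odd, strict: 8t+1 < (2k+3)^2 ⇒ 8t+2 ≤ (2k+3)^2 ⇒ since both sides... use parity-free bound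
    nlinarith [hmval]
  · have : ((r : Int) - 1) = ((r - 1 : Nat) : Int) := by omega
    rw [this]
    exact_mod_cast PySem.Int.floordiv_natCast (r - 1) 2

-- ===== VERDICT (by name: the statement is the Claim_ definition above) =====
theorem solve_spec : Claim_equal_solve := by
  intro A _
  unfold Spec_solve solve solve_alt
  simp only []
  have hfold : A.foldl (fun acc num => acc + num) 0 = A.foldl (· + ·) 0 := rfl
  rw [hfold]
  set total := A.foldl (· + ·) 0 with htot
  by_cases ht : total < 1
  · simp only [ht, if_pos]
    rw [solveLoop]
    have : ¬ total ≥ (1 : Int) := by omega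
    simp [this]
  · simp only [ht]
    push Not at ht
    obtain ⟨k, ⟨hlb, hub⟩, heq⟩ := alt_char total ht
    rw [heq]
    exact solveLoop_char k total 1 (le_refl 1) hlb hub
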